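-- pv_equiv track=rewrite | github.com/qkrwjdduf159/Coding-test | 프로그래머스/Python/프로그래머스 1단계.py | solution
-- ===== SOURCE A (Python) =====
-- def solution(answers):
--     list_1 = [1,2,3,4,5]
--     list_2 = [2,1,2,3,2,4,2,5]
--     list_3 = [3,3,1,1,2,2,4,4,5,5]
--     answer_1 = 0
--     answer_2 = 0
--     answer_3 = 0
--     for i in range(len(answers)):
--         if answers[i] == list_1[i%len(list_1)]:
--             answer_1 +=1
--         if answers[i] == list_2[i%len(list_2)]:
--             answer_2 += 1
--         if answers[i] == list_3[i%len(list_3)]: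
--             answer_3 += 1
--     answer = []
--     right_answer = max(answer_1, answer_2, answer_3)
--     if answer_1==right_answer:
--         answer.append(1)
--     if answer_2==right_answer:
--         answer.append(2)
--     if answer_3== right_answer:
--         answer.append(3)
--
--     return answer
-- ===== SOURCE B (Python) =====
-- def solution(answers):
--     # 40 = lcm(5, 8, 10), so each guesser's pick at position i depends only on i % 40.
--     # Build one frequency table of (i % 40, answer) pairs, then score each guesser by
--     # 40 table lookups instead of re-scanning the answers.
--     pats = [[1, 2, 3, 4, 5],
--             [2, 1, 2, 3, 2, 4, 2, 5],
--             [3, 3, 1, 1, 2, 2, 4, 4, 5, 5]]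
--     freq = {}
--     for i, a in enumerate(answers):
--         k = (i % 40, a)
--         freq[k] = freq.get(k, 0) + 1
--     scores = [sum(freq.get((r, p[r % len(p)]), 0) for r in range(40)) for p in pats]
--     best = max(scores)
--     return [k + 1 for k, s in enumerate(scores) if s == best]
-- ===== Notes on version B (the rewrite author's own statement) =====
-- stated objective: alternative
-- what changed: Instead of comparing each answer against the three cyclic patterns in a loop, B builds one frequency dictionary keyed by (i % 40, answer) (40 = lcm of the pattern lengths) in a single pass, then scores each guesser with 40 dictionary lookups and collects all tied 1-based indices with a comprehension.
import Mathlib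
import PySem

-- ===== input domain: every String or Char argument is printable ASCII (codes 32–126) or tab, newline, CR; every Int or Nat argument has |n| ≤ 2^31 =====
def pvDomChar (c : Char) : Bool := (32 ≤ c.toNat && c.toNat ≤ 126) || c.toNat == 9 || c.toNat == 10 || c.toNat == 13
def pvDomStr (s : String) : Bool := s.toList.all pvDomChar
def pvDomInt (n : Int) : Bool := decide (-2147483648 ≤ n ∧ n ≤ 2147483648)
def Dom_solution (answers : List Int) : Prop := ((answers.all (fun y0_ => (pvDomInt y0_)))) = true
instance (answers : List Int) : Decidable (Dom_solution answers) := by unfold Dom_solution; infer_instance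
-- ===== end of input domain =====

-- B replaces A's scan comparing each answer against the three cyclic patterns by one frequency
-- table of (i % 40, answer) pairs (40 = lcm of the pattern lengths), scored by 40 lookups per
-- guesser (alternative algorithm, same asymptotic cost).

-- ===== PORT A =====
def solution (answers : List Int) : List Int :=
  let list_1 : List Int := [1,2,3,4,5]
  let list_2 : List Int := [2,1,2,3,2,4,2,5]
  let list_3 : List Int := [3,3,1,1,2,2,4,4,5,5]
  let acc := (PySem.List.pyRange 0 (PySem.List.len answers) 1).foldl
    (fun (acc : Int × Int × Int) i =>
      (if PySem.List.pyGetD answers i 0 == PySem.List.pyGetD list_1 (PySem.Int.mod i (PySem.List.len list_1)) 0 then acc.1 + 1 else acc.1,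
       if PySem.List.pyGetD answers i 0 == PySem.List.pyGetD list_2 (PySem.Int.mod i (PySem.List.len list_2)) 0 then acc.2.1 + 1 else acc.2.1,
       if PySem.List.pyGetD answers i 0 == PySem.List.pyGetD list_3 (PySem.Int.mod i (PySem.List.len list_3)) 0 then acc.2.2 + 1 else acc.2.2))
    (0, 0, 0)
  let right_answer := max acc.1 (max acc.2.1 acc.2.2)
  let answer : List Int := []
  let answer := if acc.1 == right_answer then answer ++ [1] else answer
  let answer := if acc.2.1 == right_answer then answer ++ [2] else answer
  let answer := if acc.2.2 == right_answer then answer ++ [3] else answer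
  answer

-- ===== PORT B =====
def solution_alt (answers : List Int) : List Int :=
  let pats : List (List Int) := [[1,2,3,4,5],[2,1,2,3,2,4,2,5],[3,3,1,1,2,2,4,4,5,5]]
  let freq : PySem.Dict (Int × Int) Int :=
    (PySem.List.enumerate answers 0).foldl
      (fun d p =>
        let k : Int × Int := (PySem.Int.mod p.1 40, p.2)
        d.insert k (d.getD k 0 + 1))
      PySem.Dict.empty
  let scores : List Int := pats.map (fun p =>
    (PySem.List.pyRange 0 40 1).foldl
      (fun s r => s + freq.getD (r, PySem.List.pyGetD p (PySem.Int.mod r (PySem.List.len p)) 0) 0) 0)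
  let best := (PySem.List.max? scores (fun y => y)).getD 0
  ((PySem.List.enumerate scores 0).filter (fun q => q.2 == best)).map (fun q => q.1 + 1)

-- ===== PRECONDITION & SPEC =====
def Spec_solution (answers : List Int) (out : List Int) : Prop := out = solution_alt answers
instance (answers : List Int) (out : List Int) : Decidable (Spec_solution answers out) := by unfold Spec_solution; infer_instance

-- ===== CLAIM (what is proved, stated in full; the proofs are below) =====
def Claim_equal_solution : Prop := ∀ (answers : List Int), Dom_solution answers → Spec_solution answers (solution answers)

-- ===== LEMMAS AND PROOFS =====

-- summing, over the distinct residues R, the multiplicity of the pair (r, f r) in L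
-- counts exactly the pairs of L whose value agrees with f at their residue
theorem pvSumCount (L : List (Int × Int)) (R : List Int) (f : Int → Int)
    (hnd : R.Nodup) (hmem : ∀ q ∈ L, q.1 ∈ R) :
    (R.map (fun r => ((L.count (r, f r) : Nat) : Int))).sum
      = ((L.countP (fun q => q.2 == f q.1) : Nat) : Int) := by
  induction L with
  | nil => simp
  | cons q L ih =>
    have hq : q.1 ∈ R := hmem q (List.mem_cons_self)
    have hmem' : ∀ p ∈ L, p.1 ∈ R := fun p hp => hmem p (List.mem_cons_of_mem _ hp)
    have hcount : ∀ r : Int, (((q :: L).count (r, f r) : Nat) : Int)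
        = ((L.count (r, f r) : Nat) : Int) + (if ((r, f r) == q) then (1:Int) else 0) := by
      intro r
      have hsw : (q == (r, f r)) = ((r, f r) == q) := by simp [eq_comm]
      rw [List.count_cons, hsw]
      split <;> push_cast <;> simp
    calc (R.map (fun r => (((q :: L).count (r, f r) : Nat) : Int))).sum
        = (R.map (fun r => ((L.count (r, f r) : Nat) : Int) + (if ((r, f r) == q) then (1:Int) else 0))).sum := by
          exact congrArg List.sum (List.map_congr_left (fun r _ => hcount r))
      _ = (R.map (fun r => ((L.count (r, f r) : Nat) : Int))).sum
            + (R.map (fun r => if ((r, f r) == q) then (1:Int) else 0)).sum := by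
          rw [PySem.List.sum_map_add_int]
      _ = ((L.countP (fun p => p.2 == f p.1) : Nat) : Int)
            + (if (q.2 == f q.1) then (1:Int) else 0) := by
          rw [ih hmem', PySem.List.sum_map_ite_one_zero]
          congr 1
          by_cases h : q.2 = f q.1
          · have : R.countP (fun r => ((r, f r) == q)) = R.countP (fun r => (r == q.1)) := by
              apply List.countP_congr
              intro r _
              constructor
              · intro hr
                have : (r, f r) = q := by simpa using hr
                simp [← this]
              · intro hr
                have hr' : r = q.1 := by simpa using hr
                subst hr'
                simp [h.symm]
            rw [this]
            have : R.countP (fun r => (r == q.1)) = R.count q.1 := rfl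
            rw [this, List.count_eq_one_of_mem hnd hq]
            simp [h]
          · have : R.countP (fun r => ((r, f r) == q)) = 0 := by
              apply List.countP_eq_zero.mpr
              intro r _
              simp only [beq_iff_eq, Prod.ext_iff]
              rintro ⟨h1, h2⟩
              exact h (by rw [← h2, h1])
            rw [this]
            simp [fun hh : q.2 = f q.1 => h hh]
      _ = (((q :: L).countP (fun p => p.2 == f p.1) : Nat) : Int) := by
          rw [List.countP_cons]
          split <;> push_cast <;> simp
    
-- B's per-pattern score (40 lookups in the frequency table) is the count of matching positions
theorem pvScoreB_eq (answers pat : List Int) (hpos : 0 < PySem.List.len pat)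
    (hdvd : PySem.List.len pat ∣ 40) :
    (PySem.List.pyRange 0 40 1).foldl
      (fun s r => s + (PySem.Dict.counter
          ((PySem.List.enumerate answers 0).map (fun p => (PySem.Int.mod p.1 40, p.2)))).getD
          (r, PySem.List.pyGetD pat (PySem.Int.mod r (PySem.List.len pat)) 0) 0) 0
    = ((PySem.List.pyRange 0 (PySem.List.len answers) 1).countP
        (fun j => PySem.List.pyGetD answers j 0 ==
          PySem.List.pyGetD pat (PySem.Int.mod j (PySem.List.len pat)) 0) : Int) := by
  set L := (PySem.List.enumerate answers 0).map (fun p => (PySem.Int.mod p.1 40, p.2)) with hL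
  rw [PySem.List.foldl_add (g := fun r => (PySem.Dict.counter L).getD
      (r, PySem.List.pyGetD pat (PySem.Int.mod r (PySem.List.len pat)) 0) 0)]
  simp only [PySem.Dict.getD_counter, zero_add]
  rw [pvSumCount L (PySem.List.pyRange 0 40 1)
      (fun r => PySem.List.pyGetD pat (PySem.Int.mod r (PySem.List.len pat)) 0)
      (by decide)
      (by
        intro q hq
        rw [hL] at hq
        rcases List.mem_map.mp hq with ⟨p, _, hp⟩
        rw [← hp]
        rw [PySem.List.mem_pyRange_one]
        exact ⟨PySem.Int.mod_nonneg _ (by norm_num), PySem.Int.mod_lt _ (by norm_num)⟩)]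
  rw [hL, List.countP_map]
  rw [PySem.List.enumerate_eq_map_pyRange (d := 0), List.countP_map]
  congr 1
  apply List.countP_congr
  intro j _
  simp only [Function.comp]
  -- (j % 40) % len pat = j % len pat since len pat divides 40
  have hmm : PySem.Int.mod (PySem.Int.mod j 40) (PySem.List.len pat) = PySem.Int.mod j (PySem.List.len pat) := by
    rw [PySem.Int.mod_eq_emod_of_pos (by norm_num : (0:Int) < 40),
        PySem.Int.mod_eq_emod_of_pos hpos, PySem.Int.mod_eq_emod_of_pos hpos]
    exact Int.emod_emod_of_dvd j hdvd
  rw [hmm]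

-- A's interleaved loop computes the triple of the three per-pattern counts
theorem pvLoopA_eq (answers : List Int) :
    ((PySem.List.pyRange 0 (PySem.List.len answers) 1).foldl
      (fun (acc : Int × Int × Int) i =>
        (if PySem.List.pyGetD answers i 0 == PySem.List.pyGetD ([1,2,3,4,5] : List Int) (PySem.Int.mod i (PySem.List.len ([1,2,3,4,5] : List Int))) 0 then acc.1 + 1 else acc.1,
         if PySem.List.pyGetD answers i 0 == PySem.List.pyGetD ([2,1,2,3,2,4,2,5] : List Int) (PySem.Int.mod i (PySem.List.len ([2,1,2,3,2,4,2,5] : List Int))) 0 then acc.2.1 + 1 else acc.2.1,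
         if PySem.List.pyGetD answers i 0 == PySem.List.pyGetD ([3,3,1,1,2,2,4,4,5,5] : List Int) (PySem.Int.mod i (PySem.List.len ([3,3,1,1,2,2,4,4,5,5] : List Int))) 0 then acc.2.2 + 1 else acc.2.2))
      ((0 : Int), (0 : Int), (0 : Int))) =
    (((PySem.List.pyRange 0 (PySem.List.len answers) 1).countP (fun j => PySem.List.pyGetD answers j 0 == PySem.List.pyGetD ([1,2,3,4,5] : List Int) (PySem.Int.mod j (PySem.List.len ([1,2,3,4,5] : List Int))) 0) : Int),
     ((PySem.List.pyRange 0 (PySem.List.len answers) 1).countP (fun j => PySem.List.pyGetD answers j 0 == PySem.List.pyGetD ([2,1,2,3,2,4,2,5] : List Int) (PySem.Int.mod j (PySem.List.len ([2,1,2,3,2,4,2,5] : List Int))) 0) : Int),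
     ((PySem.List.pyRange 0 (PySem.List.len answers) 1).countP (fun j => PySem.List.pyGetD answers j 0 == PySem.List.pyGetD ([3,3,1,1,2,2,4,4,5,5] : List Int) (PySem.Int.mod j (PySem.List.len ([3,3,1,1,2,2,4,4,5,5] : List Int))) 0) : Int)) := by
  rw [PySem.List.foldl_prod_mk
    (f := fun (a : Int) i => if PySem.List.pyGetD answers i 0 == PySem.List.pyGetD ([1,2,3,4,5] : List Int) (PySem.Int.mod i (PySem.List.len ([1,2,3,4,5] : List Int))) 0 then a + 1 else a)
    (g := fun (s : Int × Int) i =>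
      (if PySem.List.pyGetD answers i 0 == PySem.List.pyGetD ([2,1,2,3,2,4,2,5] : List Int) (PySem.Int.mod i (PySem.List.len ([2,1,2,3,2,4,2,5] : List Int))) 0 then s.1 + 1 else s.1,
       if PySem.List.pyGetD answers i 0 == PySem.List.pyGetD ([3,3,1,1,2,2,4,4,5,5] : List Int) (PySem.Int.mod i (PySem.List.len ([3,3,1,1,2,2,4,4,5,5] : List Int))) 0 then s.2 + 1 else s.2))]
  rw [PySem.List.foldl_prod_mk
    (f := fun (a : Int) i => if PySem.List.pyGetD answers i 0 == PySem.List.pyGetD ([2,1,2,3,2,4,2,5] : List Int) (PySem.Int.mod i (PySem.List.len ([2,1,2,3,2,4,2,5] : List Int))) 0 then a + 1 else a)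
    (g := fun (a : Int) i => if PySem.List.pyGetD answers i 0 == PySem.List.pyGetD ([3,3,1,1,2,2,4,4,5,5] : List Int) (PySem.Int.mod i (PySem.List.len ([3,3,1,1,2,2,4,4,5,5] : List Int))) 0 then a + 1 else a)]
  rw [PySem.List.foldl_if_add_one, PySem.List.foldl_if_add_one, PySem.List.foldl_if_add_one]
  simp

theorem solution_eq_alt (answers : List Int) : solution answers = solution_alt answers := by
  unfold solution solution_alt
  simp only [List.map]
  rw [← List.foldl_map (f := fun (p : Int × Int) => ((PySem.Int.mod p.1 40, p.2) : Int × Int))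
      (g := fun (d : PySem.Dict (Int × Int) Int) (x : Int × Int) => d.insert x (d.getD x 0 + 1)),
      PySem.Dict.foldl_insert_getD_add_one_eq_counter]
  rw [pvScoreB_eq answers [1,2,3,4,5] (by decide) (by decide),
      pvScoreB_eq answers [2,1,2,3,2,4,2,5] (by decide) (by decide),
      pvScoreB_eq answers [3,3,1,1,2,2,4,4,5,5] (by decide) (by decide)]
  rw [pvLoopA_eq answers]
  generalize ((PySem.List.pyRange 0 (PySem.List.len answers) 1).countP (fun j => PySem.List.pyGetD answers j 0 == PySem.List.pyGetD ([1,2,3,4,5] : List Int) (PySem.Int.mod j (PySem.List.len ([1,2,3,4,5] : List Int))) 0) : Int) = c1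
  generalize ((PySem.List.pyRange 0 (PySem.List.len answers) 1).countP (fun j => PySem.List.pyGetD answers j 0 == PySem.List.pyGetD ([2,1,2,3,2,4,2,5] : List Int) (PySem.Int.mod j (PySem.List.len ([2,1,2,3,2,4,2,5] : List Int))) 0) : Int) = c2
  generalize ((PySem.List.pyRange 0 (PySem.List.len answers) 1).countP (fun j => PySem.List.pyGetD answers j 0 == PySem.List.pyGetD ([3,3,1,1,2,2,4,4,5,5] : List Int) (PySem.Int.mod j (PySem.List.len ([3,3,1,1,2,2,4,4,5,5] : List Int))) 0) : Int) = c3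
  simp only [PySem.List.enumerate_cons, PySem.List.enumerate_nil, PySem.List.max?_id_cons,
    List.foldl, Option.getD_some, List.filter_cons, List.filter_nil]
  rw [show max c1 (max c2 c3) = max (max c1 c2) c3 from (max_assoc c1 c2 c3).symm]
  generalize max (max c1 c2) c3 = m
  split_ifs <;> rfl

-- ===== VERDICT (by name: the statement is the Claim_ definition above) =====
theorem solution_spec : Claim_equal_solution := by
  intro answers _
  unfold Spec_solution
  exact solution_eq_alt answers
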